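-- pv_equiv track=rewrite | github.com/MrBrantCode/unitest_baseline | mut_generate/mist_train_cf/cf_79750/solution.py | strong_palindrome
-- ===== SOURCE A (Python) =====
-- def is_palindrome(n):
--     return str(n) == str(n)[::-1]
--
-- def convert_base(n, b):
--     if n < b:
--         return str(n)
--     s = ""
--     while n:
--         s = str(n % b) + s
--         n //= b
--     return s
--
-- def strong_palindrome(n):
--     base = 2
--     while (base - 1)**2 <= n:
--         if is_palindrome(convert_base(n, base)):
--             if base == 2 or is_palindrome(convert_base(n, base + 1)):
--                 return True
--         base += 1
--     return False
-- ===== SOURCE B (Python) =====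
-- def _rep(n, b):
--     if n < b:
--         return str(n)
--     return _rep(n // b, b) + str(n % b)
--
-- def strong_palindrome(n):
--     if n < 1:
--         return False
--     maxbase = 2
--     while maxbase * maxbase <= n:
--         maxbase += 1
--     pal = {b: _rep(n, b) == _rep(n, b)[::-1] for b in range(2, maxbase + 2)}
--     return pal[2] or any(pal[b] and pal[b + 1] for b in range(3, maxbase + 1))
-- ===== Notes on version B (the rewrite author's own statement) =====
-- stated objective: alternative
-- what changed: A interleaves base conversion, palindrome tests and early return inside one while-loop; B first computes maxbase, then builds a base-to-is-palindrome table for bases 2..maxbase+1 (representations built by recursion on n//b instead of A's digit-prepending string loop), and finally scans the table for base 2 or an adjacent palindromic pair.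
import Mathlib
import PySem

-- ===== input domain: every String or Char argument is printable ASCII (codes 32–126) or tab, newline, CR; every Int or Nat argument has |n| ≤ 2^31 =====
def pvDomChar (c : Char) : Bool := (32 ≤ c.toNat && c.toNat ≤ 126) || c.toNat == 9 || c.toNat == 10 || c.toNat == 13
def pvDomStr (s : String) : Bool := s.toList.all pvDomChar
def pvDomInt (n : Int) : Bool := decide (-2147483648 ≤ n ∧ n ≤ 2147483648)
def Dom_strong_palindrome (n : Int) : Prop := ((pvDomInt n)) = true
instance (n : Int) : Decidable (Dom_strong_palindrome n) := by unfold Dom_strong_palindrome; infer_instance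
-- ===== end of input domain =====

-- B re-decomposes A's interleaved convert-and-test while-loop into separate passes (maxbase, a
-- base→is-palindrome table, then a pair scan) with a recursive digit builder; same return value, same cost.

-- ===== PORT A =====
-- is_palindrome(n): here always called on a string; str(s) == s, and s[::-1] via PySem slice (step -1 ≠ 0, so slice? is never none and the getD default is unreachable)
def pvIsPalA (s : String) : Bool := s == (PySem.Str.slice? s none none (-1)).getD s

-- the `while n:` loop of convert_base; fuel n.toNat+1 suffices (entered only with n ≥ b ≥ 2 and n//b < n)
def pvConvLoopA (b : Int) : Nat → Int → String → String
  | 0, _, s => s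
  | f+1, n, s =>
      if n ≠ 0 then
        pvConvLoopA b f (PySem.Int.floordiv n b) (PySem.Int.toStr (PySem.Int.mod n b) ++ s)
      else s

def convert_base (n b : Int) : String :=
  if n < b then PySem.Int.toStr n else pvConvLoopA b (n.toNat + 1) n ""

-- the `while (base - 1)**2 <= n:` loop of A; fuel n.toNat+2 suffices (base ≤ n+1 while the guard holds)
def pvMainLoopA (n : Int) : Nat → Int → Bool
  | 0, _ => false
  | f+1, base =>
      if (base - 1)^2 ≤ n then
        (if pvIsPalA (convert_base n base) then
          (if base == 2 || pvIsPalA (convert_base n (base + 1)) then true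
           else pvMainLoopA n f (base + 1))
         else pvMainLoopA n f (base + 1))
      else false

def strong_palindrome (n : Int) : Bool := pvMainLoopA n (n.toNat + 2) 2

-- ===== PORT B =====
-- _rep(n, b): recursive digit builder; fuel n.toNat+1 suffices (n//b < n for n ≥ b ≥ 2)
def pvRepB (b : Int) : Nat → Int → String
  | 0, n => PySem.Int.toStr n
  | f+1, n =>
      if n < b then PySem.Int.toStr n
      else pvRepB b f (PySem.Int.floordiv n b) ++ PySem.Int.toStr (PySem.Int.mod n b)

-- the `while maxbase * maxbase <= n:` loop; fuel n.toNat+1 suffices (maxbase ≤ n while the guard holds)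
def pvMaxBaseB (n : Int) : Nat → Int → Int
  | 0, m => m
  | f+1, m => if m * m ≤ n then pvMaxBaseB n f (m + 1) else m

-- the dict comprehension {b: _rep(n,b) == _rep(n,b)[::-1] for b in range(2, maxbase+2)}
def pvPalTableB (n m : Int) : PySem.Dict Int Bool :=
  (PySem.List.pyRange 2 (m + 2)).foldl
    (fun d b =>
      d.insert b
        (pvRepB b (n.toNat + 1) n ==
          (PySem.Str.slice? (pvRepB b (n.toNat + 1) n) none none (-1)).getD (pvRepB b (n.toNat + 1) n)))
    PySem.Dict.empty

-- keys 2..maxbase+1 are always present, so Dict.getD's default is unreachable (= Python's pal[...])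
def strong_palindrome_alt (n : Int) : Bool :=
  if n < 1 then false
  else
    (pvPalTableB n (pvMaxBaseB n (n.toNat + 1) 2)).getD 2 false ||
      (PySem.List.pyRange 3 (pvMaxBaseB n (n.toNat + 1) 2 + 1)).any
        (fun b =>
          (pvPalTableB n (pvMaxBaseB n (n.toNat + 1) 2)).getD b false &&
            (pvPalTableB n (pvMaxBaseB n (n.toNat + 1) 2)).getD (b + 1) false)

-- ===== PRECONDITION & SPEC =====
def Spec_strong_palindrome (n : Int) (out : Bool) : Prop := out = strong_palindrome_alt n
instance (n : Int) (out : Bool) : Decidable (Spec_strong_palindrome n out) := by unfold Spec_strong_palindrome; infer_instance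

-- ===== CLAIM (what is proved, stated in full; the proofs are below) =====
def Claim_equal_strong_palindrome : Prop := ∀ (n : Int), Dom_strong_palindrome n → Spec_strong_palindrome n (strong_palindrome n)

-- ===== LEMMAS AND PROOFS =====

-- one-step unfolding lemmas (controlled rewriting of the fuelled recursions)
theorem pvConvLoopA_succ (b : Int) (f : Nat) (n : Int) (s : String) :
    pvConvLoopA b (f+1) n s =
      if n ≠ 0 then pvConvLoopA b f (PySem.Int.floordiv n b) (PySem.Int.toStr (PySem.Int.mod n b) ++ s)
      else s := rfl

theorem pvRepB_succ (b : Int) (f : Nat) (n : Int) :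
    pvRepB b (f+1) n =
      if n < b then PySem.Int.toStr n
      else pvRepB b f (PySem.Int.floordiv n b) ++ PySem.Int.toStr (PySem.Int.mod n b) := rfl

theorem pvMaxBaseB_succ (n : Int) (f : Nat) (m : Int) :
    pvMaxBaseB n (f+1) m = if m * m ≤ n then pvMaxBaseB n f (m + 1) else m := rfl

theorem pvMainLoopA_succ (n : Int) (f : Nat) (base : Int) :
    pvMainLoopA n (f+1) base =
      if (base - 1)^2 ≤ n then
        (if pvIsPalA (convert_base n base) then
          (if base == 2 || pvIsPalA (convert_base n (base + 1)) then true
           else pvMainLoopA n f (base + 1))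
         else pvMainLoopA n f (base + 1))
      else false := rfl

-- the value B's table stores at key b
def pvValB (n b : Int) : Bool :=
  pvRepB b (n.toNat + 1) n ==
    (PySem.Str.slice? (pvRepB b (n.toNat + 1) n) none none (-1)).getD (pvRepB b (n.toNat + 1) n)

theorem pvRangeNil (a b : Int) (h : b ≤ a) : PySem.List.pyRange a b = [] := by
  rw [List.eq_nil_iff_forall_not_mem]
  intro x hx
  rw [PySem.List.mem_pyRange_one] at hx
  omega

theorem pvRangeNodupAux : ∀ (k : Nat) (a b : Int), (b - a).toNat ≤ k → (PySem.List.pyRange a b).Nodup := by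
  intro k
  induction k with
  | zero =>
    intro a b h
    rw [pvRangeNil a b (by omega)]
    exact List.nodup_nil
  | succ k ih =>
    intro a b h
    by_cases hab : a < b
    · rw [PySem.List.pyRange_one_cons hab]
      refine (List.nodup_cons).mpr ⟨?_, ih (a+1) b (by omega)⟩
      intro hmem
      rw [PySem.List.mem_pyRange_one] at hmem
      omega
    · rw [pvRangeNil a b (by omega)]
      exact List.nodup_nil

theorem pvRangeNodupAll (a b : Int) : (PySem.List.pyRange a b).Nodup :=
  pvRangeNodupAux (b - a).toNat a b le_rfl

theorem pvAnyCongr {α : Type} (l : List α) (f g : α → Bool) (h : ∀ x ∈ l, f x = g x) :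
    l.any f = l.any g := by
  induction l with
  | nil => rfl
  | cons x xs ih =>
    simp only [List.any_cons]
    rw [h x (by simp), ih (fun y hy => h y (by simp [hy]))]

-- A's convert loop computes B's recursive representation (with a trailing accumulator)
theorem pvConvRep (b : Int) (hb : 2 ≤ b) :
    ∀ (f : Nat), ∀ (g : Nat) (n : Int) (s : String), 0 ≤ n → n.toNat < f → n.toNat < g →
      pvConvLoopA b f n s = (if n = 0 then "" else pvRepB b g n) ++ s := by
  intro f
  induction f with
  | zero => intro g n s h0 h1 h2; omega
  | succ f ih =>
    intro g n s h0 h1 h2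
    rw [pvConvLoopA_succ]
    by_cases hn0 : n = 0
    · rw [if_neg (by simp [hn0]), if_pos hn0, String.empty_append]
    · rw [if_pos hn0, if_neg hn0]
      have hb0 : (0:Int) < b := by omega
      have h1n : (1:Int) ≤ n := by omega
      have hdn : 0 ≤ PySem.Int.floordiv n b := by
        rw [PySem.Int.le_floordiv_iff_mul_le hb0]
        simpa using h0
      have hlt : PySem.Int.floordiv n b < n := by
        rw [PySem.Int.floordiv_lt_iff_lt_mul hb0]
        have h2n : n * 2 ≤ n * b := mul_le_mul_of_nonneg_left hb (by omega)
        linarith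
      cases g with
      | zero => omega
      | succ g =>
        rw [ih g (PySem.Int.floordiv n b) (PySem.Int.toStr (PySem.Int.mod n b) ++ s) hdn (by omega) (by omega)]
        rw [pvRepB_succ]
        by_cases hnb : n < b
        · have hq0 : PySem.Int.floordiv n b = 0 :=
            (PySem.Int.floordiv_eq_iff_of_pos hb0).mpr ⟨by simpa using h0, by simpa using hnb⟩
          have hmod : PySem.Int.mod n b = n := by
            rw [PySem.Int.mod_eq_emod_of_pos hb0]
            exact Int.emod_eq_of_lt h0 hnb
          rw [if_pos hq0, if_pos hnb, String.empty_append, hmod]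
        · have hq1 : 1 ≤ PySem.Int.floordiv n b := by
            rw [PySem.Int.le_floordiv_iff_mul_le hb0]
            omega
          rw [if_neg (by omega : ¬ PySem.Int.floordiv n b = 0), if_neg hnb, String.append_assoc]

theorem pvRep_eq_conv (b n : Int) (hb : 2 ≤ b) (hn : 0 ≤ n) (f : Nat) (hf : n.toNat < f) :
    pvRepB b f n = convert_base n b := by
  unfold convert_base
  by_cases hnb : n < b
  · rw [if_pos hnb]
    cases f with
    | zero => omega
    | succ f => rw [pvRepB_succ, if_pos hnb]
  · rw [if_neg hnb]
    have hn0 : n ≠ 0 := by omega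
    rw [pvConvRep b hb (n.toNat + 1) f n "" hn (by omega) hf, if_neg hn0, String.append_empty]

theorem pvMaxBaseSpec (n : Int) (hn : 1 ≤ n) :
    ∀ (f : Nat) (m : Int), 2 ≤ m → (m - 1)^2 ≤ n → (n + 1 - m).toNat < f →
      2 ≤ pvMaxBaseB n f m ∧ (pvMaxBaseB n f m - 1)^2 ≤ n ∧ n < (pvMaxBaseB n f m)^2 := by
  intro f
  induction f with
  | zero => intro m _ _ h; omega
  | succ f ih =>
    intro m hm2 hml hfuel
    rw [pvMaxBaseB_succ]
    by_cases h : m * m ≤ n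
    · rw [if_pos h]
      have hmm : m ≤ m * m := le_mul_of_one_le_left (by omega) (by omega)
      have hmn : m ≤ n := by linarith
      refine ih (m + 1) (by omega) ?_ (by omega)
      rw [show (m + 1 - 1 : Int) = m from by ring, pow_two]
      exact h
    · rw [if_neg h]
      push_neg at h
      exact ⟨hm2, hml, by rw [pow_two]; exact h⟩

theorem pvBracket (n m base : Int) (hm2 : 2 ≤ m) (hml : (m - 1)^2 ≤ n) (hmu : n < m^2)
    (hb : 2 ≤ base) : ((base - 1)^2 ≤ n ↔ base ≤ m) := by
  rw [pow_two] at hml hmu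
  rw [pow_two]
  constructor
  · intro h
    by_contra hc
    push_neg at hc
    have h1 : m ≤ base - 1 := by omega
    have h2 : m * m ≤ (base - 1) * (base - 1) := mul_le_mul h1 h1 (by omega) (by omega)
    linarith
  · intro h
    have h1 : base - 1 ≤ m - 1 := by omega
    have h2 : (base - 1) * (base - 1) ≤ (m - 1) * (m - 1) := mul_le_mul h1 h1 (by omega) (by omega)
    linarith

theorem pvMainLoopEq (n m : Int) (hn : 1 ≤ n) (hm2 : 2 ≤ m) (hml : (m - 1)^2 ≤ n)
    (hmu : n < m^2) :
    ∀ (f : Nat) (base : Int), 3 ≤ base → (n + 2 - base).toNat < f →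
      pvMainLoopA n f base =
        (PySem.List.pyRange base (m + 1)).any
          (fun b => pvIsPalA (convert_base n b) && pvIsPalA (convert_base n (b + 1))) := by
  intro f
  induction f with
  | zero => intro base _ h; omega
  | succ f ih =>
    intro base hb3 hfuel
    rw [pvMainLoopA_succ]
    by_cases hc : (base - 1)^2 ≤ n
    · have hbm : base ≤ m := (pvBracket n m base hm2 hml hmu (by omega)).mp hc
      have hbn : base ≤ n + 1 := by
        have h2 : base - 1 ≤ (base - 1) * (base - 1) := le_mul_of_one_le_left (by omega) (by omega)
        rw [pow_two] at hc
        linarith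
      rw [if_pos hc, PySem.List.pyRange_one_cons (by omega : base < m + 1), List.any_cons]
      rw [ih (base + 1) (by omega) (by omega)]
      have hb2 : (base == 2) = false := by
        rw [beq_eq_false_iff_ne]
        omega
      rw [hb2]
      cases hp : pvIsPalA (convert_base n base) <;>
        cases hq : pvIsPalA (convert_base n (base + 1)) <;> simp [hp, hq]
    · have hbm : ¬ base ≤ m := fun h => hc ((pvBracket n m base hm2 hml hmu (by omega)).mpr h)
      rw [if_neg hc, pvRangeNil base (m + 1) (by omega)]
      simp

theorem pvTableGetD (n m b : Int) (hn : 0 ≤ n) (hb2 : 2 ≤ b) (hbu : b < m + 2) :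
    (pvPalTableB n m).getD b false = pvIsPalA (convert_base n b) := by
  have hbmem : b ∈ PySem.List.pyRange 2 (m + 2) := (PySem.List.mem_pyRange_one).mpr ⟨hb2, hbu⟩
  have hcont : ∀ a ∈ PySem.List.pyRange 2 (m + 2),
      (PySem.Dict.empty : PySem.Dict Int Bool).contains ((fun x => x) a) = false := by
    intro a _
    simp [pysem]
  have hnd : (List.map (fun x : Int => x) (PySem.List.pyRange 2 (m + 2))).Nodup := by
    simpa using pvRangeNodupAll 2 (m + 2)
  have hitems : (pvPalTableB n m).items =
      ([] : List (Int × Bool)) ++ List.map (fun a => (a, pvValB n a)) (PySem.List.pyRange 2 (m + 2)) := by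
    unfold pvPalTableB pvValB
    exact PySem.Dict.items_foldl_insert_fresh (PySem.List.pyRange 2 (m + 2)) (fun x => x)
      (fun a => pvRepB a (n.toNat + 1) n ==
        (PySem.Str.slice? (pvRepB a (n.toNat + 1) n) none none (-1)).getD (pvRepB a (n.toNat + 1) n))
      PySem.Dict.empty hcont hnd
  have hkeys : (pvPalTableB n m).keys.Nodup := by
    unfold pvPalTableB
    exact PySem.Dict.nodup_keys_foldl_insert _ _ _ (by simp [pysem])
  have hmemitem : (b, pvValB n b) ∈ (pvPalTableB n m).items := by
    rw [hitems, List.nil_append]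
    exact List.mem_map.mpr ⟨b, hbmem, rfl⟩
  rw [PySem.Dict.getD_of_mem_items _ hmemitem hkeys false]
  unfold pvValB pvIsPalA
  rw [pvRep_eq_conv b n hb2 hn (n.toNat + 1) (by omega)]

-- ===== VERDICT (by name: the statement is the Claim_ definition above) =====
theorem strong_palindrome_spec : Claim_equal_strong_palindrome := by
  intro n _
  unfold Spec_strong_palindrome
  by_cases hn : n < 1
  · unfold strong_palindrome strong_palindrome_alt
    rw [if_pos hn]
    show pvMainLoopA n (n.toNat + 1 + 1) 2 = false
    rw [pvMainLoopA_succ, if_neg]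
    rw [show ((2:Int) - 1)^2 = 1 from by norm_num]
    omega
  · have hn1 : (1:Int) ≤ n := by omega
    have h0 : (0:Int) ≤ n := by omega
    obtain ⟨hm2, hml, hmu⟩ :=
      pvMaxBaseSpec n hn1 (n.toNat + 1) 2 (le_refl 2)
        (by rw [show ((2:Int) - 1)^2 = 1 from by norm_num]; omega) (by omega)
    have hA : strong_palindrome n =
        (pvIsPalA (convert_base n 2) || pvMainLoopA n (n.toNat + 1) 3) := by
      unfold strong_palindrome
      show pvMainLoopA n (n.toNat + 1 + 1) 2 = _
      rw [pvMainLoopA_succ,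
        if_pos (by rw [show ((2:Int) - 1)^2 = 1 from by norm_num]; omega)]
      cases hp : pvIsPalA (convert_base n 2) <;> simp [hp]
    have hB : strong_palindrome_alt n =
        ((pvPalTableB n (pvMaxBaseB n (n.toNat + 1) 2)).getD 2 false ||
          (PySem.List.pyRange 3 (pvMaxBaseB n (n.toNat + 1) 2 + 1)).any
            (fun b =>
              (pvPalTableB n (pvMaxBaseB n (n.toNat + 1) 2)).getD b false &&
                (pvPalTableB n (pvMaxBaseB n (n.toNat + 1) 2)).getD (b + 1) false)) := by
      unfold strong_palindrome_alt
      rw [if_neg hn]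
    rw [hA, hB, pvTableGetD n _ 2 h0 (le_refl 2) (by omega)]
    congr 1
    rw [pvMainLoopEq n (pvMaxBaseB n (n.toNat + 1) 2) hn1 hm2 hml hmu (n.toNat + 1) 3
      (by norm_num) (by omega)]
    refine pvAnyCongr _ _ _ ?_
    intro b hb
    rw [PySem.List.mem_pyRange_one] at hb
    rw [pvTableGetD n _ b h0 (by omega) (by omega),
      pvTableGetD n _ (b + 1) h0 (by omega) (by omega)]
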